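-- pv_equiv track=rewrite | github.com/m-essam-s/Cipher-Techniques | TranspositionCiphers/main.py | _keyHandler
-- ===== SOURCE A (Python) =====
-- def _keyHandler(_key):
--     _keyList = list(_key) # Convert the key to a list
--     _handledKey = list(dict.fromkeys(_keyList)) # Remove the duplicates from the key
--     if len(_keyList)==len(list(dict.fromkeys(_keyList))): # If the key is unique (Best case scenario)
--         return _key
--     else: # If the key is not unique (Worst case scenario)
--         _upperCasesList = [chr(65 + i) for i in range(26)] # List of upper case alphabets
--         _lowerCasesList = [chr(97 + i) for i in range(26)] # List of lower case alphabets
--         _spchialCasesList=list("!@#($%<^&*()_+}{:?)>=-`~[]") # List of special characters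
--
--         _mixedCases=[] # Empty list of mixed cases
--         for i, j, k in zip(_upperCasesList, _spchialCasesList, _lowerCasesList[::-1]): # Loop through the lists
--             if i not in _handledKey and not(len(_handledKey)+len(_mixedCases)>=len(_key)):
--                 _mixedCases.append(i) # Append the upper case character to the mixed cases list if it is not in the handled key and the length of the handled key '+' mixed cases is less than the length of the original key
--             if j not in _handledKey and not(len(_handledKey)+len(_mixedCases)>=len(_key)):
--                 _mixedCases.append(j) # Append the special character to the mixed cases list if it is not in the handled key and the length of the handled key '+' mixed cases is less than the length of the original key
--             if k not in _handledKey and not(len(_handledKey)+len(_mixedCases)>=len(_key)):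
--                 _mixedCases.append(k) # Append the lower case character to the mixed cases list if it is not in the handled key and the length of the handled key '+' mixed cases is less than the length of the original key
--             if len(_handledKey)+len(_mixedCases)>=len(_key): # If the length of the handled key '+' mixed cases is greater than or equal to the length of the original key
--                 break # Break the loop
--
--         # Loop through the mixed cases to add fill missing characters in the handled key
--         for i in _mixedCases:
--             if i not in _handledKey:
--                 _handledKey.append(i)
--                 if len(_handledKey) == len(_key):
--                     break
--
--         return "".join([i for i in _handledKey]) # Return the handled key
-- ===== SOURCE B (Python) =====
-- _SPECIAL = "!@#($%<^&*()_+}{:?)>=-`~[]"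
--
-- def _candidate(m):
--     # m-th filler candidate, computed arithmetically: for triple t = m//3 the
--     # order is upper-case chr(65+t), special char, reversed lower-case chr(122-t)
--     t, p = divmod(m, 3)
--     if p == 0:
--         return chr(65 + t)
--     if p == 1:
--         return _SPECIAL[t]
--     return chr(122 - t)
--
-- def _keyHandler(_key):
--     # single seen-set pass dedupes the key (no dict.fromkeys)
--     seen = set()
--     dedup = []
--     for c in _key:
--         if c not in seen:
--             seen.add(c)
--             dedup.append(c)
--     if len(dedup) == len(_key):
--         return _key
--
--     # recursive fill over on-demand candidates with an explicit remaining budget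
--     def fill(res, m, budget):
--         if budget == 0 or m == 78:
--             return res
--         c = _candidate(m)
--         if c in seen:
--             return fill(res, m + 1, budget)
--         return fill(res if c in res else res + c, m + 1, budget - 1)
--
--     return "".join(dedup) + fill("", 0, len(_key) - len(dedup))
-- ===== Notes on version B (the rewrite author's own statement) =====
-- stated objective: alternative
-- what changed: Replaces A's dict.fromkeys dedupe (computed twice), materialized candidate lists with a zip-triple break loop and a second transfer loop by a single seen-set dedupe pass plus one recursive fill that generates each candidate on demand by arithmetic (chr(65+m//3) / special[m//3] / chr(122-m//3)) and carries an explicit remaining-budget counter, so no candidate list, no zip and no intermediate _mixedCases buffer exist.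
import Mathlib
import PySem

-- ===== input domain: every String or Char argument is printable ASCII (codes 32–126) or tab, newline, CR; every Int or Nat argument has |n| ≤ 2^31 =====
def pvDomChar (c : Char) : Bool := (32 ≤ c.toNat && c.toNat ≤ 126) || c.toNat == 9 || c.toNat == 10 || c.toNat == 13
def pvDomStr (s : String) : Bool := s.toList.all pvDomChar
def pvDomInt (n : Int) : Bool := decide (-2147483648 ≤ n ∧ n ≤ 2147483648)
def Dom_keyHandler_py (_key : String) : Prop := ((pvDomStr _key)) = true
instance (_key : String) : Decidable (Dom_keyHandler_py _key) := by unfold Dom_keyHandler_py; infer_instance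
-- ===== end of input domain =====

-- B drops A's materialized zip-triple loop and second transfer loop for a recursive
-- dedupe + on-demand arithmetic candidate generation with a budget counter (objective: alternative).

-- ===== PORT A =====
-- the statement repeated for i, j, k: 'if c not in _handledKey and not(len(_handledKey)+len(_mixedCases)>=len(_key)): _mixedCases.append(c)'
def pvStep (hk : List Char) (L : Nat) (acc : List Char) (c : Char) : List Char :=
  if c ∉ hk ∧ ¬ (hk.length + acc.length ≥ L) then acc ++ [c] else acc

-- the 'for i, j, k in zip(...)' loop with its trailing break
def pvPhase1 (hk : List Char) (L : Nat) : List (Char × Char × Char) → List Char → List Char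
  | [], acc => acc
  | (i, j, k) :: rest, acc =>
    let acc1 := pvStep hk L acc i
    let acc2 := pvStep hk L acc1 j
    let acc3 := pvStep hk L acc2 k
    if hk.length + acc3.length ≥ L then acc3 else pvPhase1 hk L rest acc3

-- the 'for i in _mixedCases' transfer loop with its break at len(_handledKey) == len(_key)
def pvPhase2 (L : Nat) : List Char → List Char → List Char
  | [], hk => hk
  | c :: rest, hk =>
    if c ∉ hk then
      let hk2 := hk ++ [c]
      if hk2.length = L then hk2 else pvPhase2 L rest hk2
    else pvPhase2 L rest hk

def keyHandler_py (_key : String) : String :=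
  let _keyList := _key.toList
  let _handledKey := PySem.List.dedup _keyList
  if _keyList.length = (PySem.List.dedup _keyList).length then _key
  else
    let _upperCasesList := (PySem.List.pyRange 0 26 1).map (fun i => Char.ofNat (65 + i).toNat)
    let _lowerCasesList := (PySem.List.pyRange 0 26 1).map (fun i => Char.ofNat (97 + i).toNat)
    let _spchialCasesList := "!@#($%<^&*()_+}{:?)>=-`~[]".toList
    -- _lowerCasesList[::-1]: slice? with step -1 always succeeds (step ≠ 0)
    let _lowerRev := (PySem.List.slice? _lowerCasesList none none (-1)).getD []
    let _trips := _upperCasesList.zip (_spchialCasesList.zip _lowerRev)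
    let _mixedCases := pvPhase1 _handledKey _keyList.length _trips []
    String.ofList (pvPhase2 _keyList.length _mixedCases _handledKey)

-- ===== PORT B =====
def pvSpecialB : List Char := "!@#($%<^&*()_+}{:?)>=-`~[]".toList

-- '_candidate(m)': the m-th filler candidate, computed arithmetically
def pvCandidateB (m : Nat) : Char :=
  let t := m / 3
  let p := m % 3
  if p = 0 then Char.ofNat (65 + t)
  else if p = 1 then (PySem.List.pyGet? pvSpecialB (Int.ofNat t)).getD ' '  -- _SPECIAL[t]; t < 26 on every call (m < 78), so pyGet? is some
  else Char.ofNat (122 - t)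

-- the seen-set dedupe pass: state is (seen : set, dedup : list)
def pvDedupeB : (PySem.Set Char × List Char) → List Char → (PySem.Set Char × List Char)
  | st, [] => st
  | (seen, out), c :: rest =>
    if PySem.Set.contains seen c then pvDedupeB (seen, out) rest
    else pvDedupeB (PySem.Set.add seen c, out ++ [c]) rest

-- 'fill(res, m, budget)'; python tests 'm == 78' but m never exceeds 78, so '78 ≤ m' is exact and gives termination
def pvFillB (seen : PySem.Set Char) (res : List Char) (m : Nat) (budget : Nat) : List Char :=
  if budget = 0 ∨ 78 ≤ m then res
  else if PySem.Set.contains seen (pvCandidateB m) then pvFillB seen res (m + 1) budget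
  else pvFillB seen (if pvCandidateB m ∈ res then res else res ++ [pvCandidateB m]) (m + 1) (budget - 1)
  termination_by 78 - m
  decreasing_by all_goals omega

def keyHandler_py_alt (_key : String) : String :=
  let st := pvDedupeB (PySem.Set.empty, []) _key.toList
  if st.2.length = _key.toList.length then _key
  else String.ofList (st.2 ++ pvFillB st.1 [] 0 (_key.toList.length - st.2.length))

-- ===== PRECONDITION & SPEC =====
def Spec_keyHandler_py (_key : String) (out : String) : Prop := out = keyHandler_py_alt _key
instance (_key : String) (out : String) : Decidable (Spec_keyHandler_py _key out) := by unfold Spec_keyHandler_py; infer_instance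

-- ===== CLAIM (what is proved, stated in full; the proofs are below) =====
def Claim_equal_keyHandler_py : Prop := ∀ (_key : String), Dom_keyHandler_py _key → Spec_keyHandler_py _key (keyHandler_py _key)

-- ===== LEMMAS AND PROOFS =====

-- once the budget is full, pvStep never appends
theorem pv_foldl_step_full (hk : List Char) (L : Nat) (cs : List Char) (acc : List Char)
    (h : hk.length + acc.length ≥ L) : cs.foldl (pvStep hk L) acc = acc := by
  induction cs generalizing acc with
  | nil => rfl
  | cons c rest ih =>
    simp only [List.foldl_cons]
    rw [show pvStep hk L acc c = acc by simp [pvStep]; omega]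
    exact ih acc h

-- the flat greedy collection is take-of-filter
theorem pv_foldl_step_eq (hk : List Char) (L : Nat) (cs : List Char) (acc : List Char)
    (h : hk.length + acc.length ≤ L) :
    cs.foldl (pvStep hk L) acc = acc ++ (cs.filter (fun c => c ∉ hk)).take (L - hk.length - acc.length) := by
  induction cs generalizing acc with
  | nil => simp
  | cons c rest ih =>
    simp only [List.foldl_cons, List.filter_cons]
    by_cases hc : c ∉ hk
    · by_cases hfull : hk.length + acc.length ≥ L
      · rw [show pvStep hk L acc c = acc by simp [pvStep]; omega]
        rw [pv_foldl_step_full hk L rest acc hfull]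
        have : L - hk.length - acc.length = 0 := by omega
        simp [this]
      · rw [show pvStep hk L acc c = acc ++ [c] by simp [pvStep, hc]; omega]
        rw [ih (acc ++ [c]) (by simp; omega)]
        simp only [hc]
        have h1 : L - hk.length - acc.length = (L - hk.length - (acc ++ [c]).length) + 1 := by
          simp; omega
        rw [h1]
        simp [List.take_succ_cons]
    · rw [show pvStep hk L acc c = acc by simp [pvStep, hc]]
      rw [ih acc h]
      simp at hc
      simp [hc]

-- the triple loop with its break is the fold over the flattened candidates
theorem pv_phase1_eq_foldl (hk : List Char) (L : Nat) (ts : List (Char × Char × Char)) (acc : List Char) :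
    pvPhase1 hk L ts acc = (ts.flatMap (fun t => [t.1, t.2.1, t.2.2])).foldl (pvStep hk L) acc := by
  induction ts generalizing acc with
  | nil => rfl
  | cons t rest ih =>
    obtain ⟨i, j, k⟩ := t
    simp only [pvPhase1, List.flatMap_cons, List.foldl_append, List.foldl_cons, List.foldl_nil]
    by_cases hfull : hk.length + (pvStep hk L (pvStep hk L (pvStep hk L acc i) j) k).length ≥ L
    · rw [if_pos hfull, pv_foldl_step_full _ _ _ _ hfull]
    · rw [if_neg hfull, ih]

-- the transfer loop's break never fires before the list is exhausted
theorem pv_phase2_eq_foldl (L : Nat) (cs : List Char) (hk : List Char)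
    (h : hk.length + cs.length ≤ L) :
    pvPhase2 L cs hk = cs.foldl (fun hk c => if c ∉ hk then hk ++ [c] else hk) hk := by
  induction cs generalizing hk with
  | nil => rfl
  | cons c rest ih =>
    simp only [pvPhase2, List.foldl_cons]
    by_cases hc : c ∉ hk
    · simp only [if_pos hc]
      by_cases hfin : (hk ++ [c]).length = L
      · rw [if_pos hfin]
        have : rest = [] := by
          simp at hfin h ⊢
          cases rest with
          | nil => rfl
          | cons d ds => simp at h; omega
        subst this; rfl
      · rw [if_neg hfin, ih (hk ++ [c]) (by simp at h ⊢; omega)]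
    · simp only [if_neg hc]
      exact ih hk (by simp at h ⊢; omega)

-- inserting only-fresh elements after a fixed prefix
theorem pv_foldl_add_prefix (fill : List Char) (pre s : List Char)
    (h : ∀ c ∈ fill, c ∉ pre) :
    fill.foldl (fun hk c => if c ∉ hk then hk ++ [c] else hk) (pre ++ s)
      = pre ++ fill.foldl (fun hk c => if c ∉ hk then hk ++ [c] else hk) s := by
  induction fill generalizing s with
  | nil => rfl
  | cons c rest ih =>
    simp only [List.foldl_cons]
    have hc := h c (by simp)
    have hmem : (c ∉ pre ++ s) ↔ (c ∉ s) := by simp [hc]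
    by_cases hs : c ∉ s
    · rw [if_pos (hmem.mpr hs), if_pos hs, List.append_assoc]
      exact ih (s ++ [c]) (fun d hd => h d (by simp [hd]))
    · rw [if_neg (fun hcon => hs (hmem.mp hcon)), if_neg hs]
      exact ih s (fun d hd => h d (by simp [hd]))

theorem pv_dedup_eq_foldl (fill : List Char) :
    PySem.List.dedup fill = fill.foldl (fun hk c => if c ∉ hk then hk ++ [c] else hk) [] := by
  rw [PySem.List.dedup_eq_ofList, PySem.Set.ofList_eq_foldl]
  congr 1
  funext s c
  simp [PySem.Set.add]

theorem pv_dedup_length_le (xs : List Char) : (PySem.List.dedup xs).length ≤ xs.length := by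
  rw [pv_dedup_eq_foldl]
  have h : ∀ (l acc : List Char), (l.foldl (fun hk c => if c ∉ hk then hk ++ [c] else hk) acc).length ≤ acc.length + l.length := by
    intro l
    induction l with
    | nil => simp
    | cons c rest ih =>
      intro acc
      simp only [List.foldl_cons]
      by_cases hc : c ∉ acc
      · rw [if_pos hc]; have := ih (acc ++ [c]); simp at this ⊢; omega
      · rw [if_neg hc]; have := ih acc; simp at this ⊢; omega
  simpa using h xs []

-- B's seen-set pass keeps seen = out, and out is the dedup fold
theorem pv_dedupeB_eq_foldl (l seen : List Char) :
    pvDedupeB (seen, seen) l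
      = (l.foldl (fun hk c => if c ∉ hk then hk ++ [c] else hk) seen,
         l.foldl (fun hk c => if c ∉ hk then hk ++ [c] else hk) seen) := by
  induction l generalizing seen with
  | nil => rfl
  | cons c rest ih =>
    simp only [pvDedupeB, List.foldl_cons]
    by_cases hc : c ∈ seen
    · rw [if_pos (by simpa [PySem.Set.contains] using hc), if_neg (by simp [hc]), ih]
    · rw [if_neg (by simpa [PySem.Set.contains] using hc), if_pos hc,
          show PySem.Set.add seen c = seen ++ [c] by simp [PySem.Set.add, PySem.Set.contains, hc], ih]

-- A's concrete 78-element flattened candidate list equals B's arithmetic generator on 0..77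
theorem pv_candidates_eq :
    ((((PySem.List.pyRange 0 26 1).map (fun i => Char.ofNat (65 + i).toNat)).zip
        (("!@#($%<^&*()_+}{:?)>=-`~[]".toList).zip
          ((PySem.List.pyRange 0 26 1).map (fun i => Char.ofNat (97 + i).toNat)).reverse)).flatMap
        (fun t => [t.1, t.2.1, t.2.2]))
      = (List.range' 0 78).map pvCandidateB := by decide

-- B's fill with budget is take-of-filter over the remaining candidates, then dedup-fold
theorem pv_fillB_eq (dedup : List Char) (res : List Char) (m budget : Nat) (hm : m ≤ 78) :
    pvFillB dedup res m budget
      = ((((List.range' m (78 - m)).map pvCandidateB).filter (fun c => c ∉ dedup)).take budget).foldl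
          (fun hk c => if c ∉ hk then hk ++ [c] else hk) res := by
  induction hn : 78 - m generalizing m res budget with
  | zero =>
    have : m = 78 := by omega
    subst this
    rw [pvFillB]
    simp
  | succ n ih =>
    rw [pvFillB]
    by_cases hb : budget = 0
    · simp [hb]
    · rw [if_neg (by omega), List.range'_succ]
      have hrec : 78 - (m + 1) = n := by omega
      by_cases hc : pvCandidateB m ∈ dedup
      · rw [if_pos (by simpa [PySem.Set.contains] using hc)]
        have := ih res (m + 1) budget (by omega) hrec
        rw [this]
        simp [hc]
      · rw [if_neg (by simpa [PySem.Set.contains] using hc)]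
        obtain ⟨b, rfl⟩ : ∃ b, budget = b + 1 := ⟨budget - 1, by omega⟩
        simp only [Nat.add_sub_cancel]
        rw [ih _ (m + 1) b (by omega) hrec]
        have hstep : (if pvCandidateB m ∈ res then res else res ++ [pvCandidateB m])
            = (if pvCandidateB m ∉ res then res ++ [pvCandidateB m] else res) := by
          by_cases hr : pvCandidateB m ∈ res <;> simp [hr]
        rw [hstep]
        simp [hc]

-- ===== VERDICT (by name: the statement is the Claim_ definition above) =====
theorem keyHandler_py_spec : Claim_equal_keyHandler_py := by
  intro _key _hdom
  unfold Spec_keyHandler_py keyHandler_py keyHandler_py_alt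
  simp only [PySem.List.slice?_none_none_neg_one, Option.getD_some]
  rw [show (PySem.Set.empty : PySem.Set Char) = ([] : List Char) from rfl, pv_dedupeB_eq_foldl, ← pv_dedup_eq_foldl]
  by_cases heq : _key.toList.length = (PySem.List.dedup _key.toList).length
  · rw [if_pos heq, if_pos heq.symm]
  · rw [if_neg heq, if_neg (fun h => heq h.symm)]
    set ks := _key.toList with hks
    set hk := PySem.List.dedup ks with hhk
    rw [pv_phase1_eq_foldl, pv_candidates_eq,
        pv_foldl_step_eq hk ks.length _ [] (by simpa using pv_dedup_length_le ks)]
    set mixed := ((((List.range' 0 78).map pvCandidateB).filter (fun c => c ∉ hk)).take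
        (ks.length - hk.length - ([] : List Char).length)) with hmixed
    have hle : hk.length ≤ ks.length := pv_dedup_length_le ks
    have hmixlen : mixed.length ≤ ks.length - hk.length :=
      le_trans (List.length_take_le _ _) (by simp)
    have hbudget : hk.length + mixed.length ≤ ks.length := by omega
    rw [List.nil_append, pv_phase2_eq_foldl ks.length mixed hk hbudget]
    have hfresh : ∀ c ∈ mixed, c ∉ hk := by
      intro c hc
      have : c ∈ ((List.range' 0 78).map pvCandidateB).filter (fun c => c ∉ hk) :=
        List.mem_of_mem_take hc
      simpa using (List.of_mem_filter this)
    rw [pv_fillB_eq hk [] 0 (ks.length - hk.length) (by omega)]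
    refine congrArg String.ofList ?_
    calc mixed.foldl (fun hk c => if c ∉ hk then hk ++ [c] else hk) hk
        = mixed.foldl (fun hk c => if c ∉ hk then hk ++ [c] else hk) (hk ++ []) := by simp
      _ = hk ++ mixed.foldl (fun hk c => if c ∉ hk then hk ++ [c] else hk) [] :=
          pv_foldl_add_prefix mixed hk [] hfresh
      _ = hk ++ ((((List.range' 0 78).map pvCandidateB).filter (fun c => c ∉ hk)).take
            (ks.length - hk.length)).foldl (fun hk c => if c ∉ hk then hk ++ [c] else hk) [] := by
          rw [hmixed]; simp
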